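-- pv_equiv track=rewrite | github.com/Valentin-Vakrilov/SoftUni-Python-Fundamentals | 21. Text Processing - Exercise/10. winning_ticket.py | winning_ticket_check
-- ===== SOURCE A (Python) =====
-- def winning_ticket_check(ticket):
--     winning_symbols = ['@', '#', '$', '^']
--     for current_symbol in winning_symbols:
--         for number_of_symbols in range(10, 5, -1):
--             number_of_repetitions = number_of_symbols * current_symbol
--             if number_of_repetitions in ticket[:10] and number_of_repetitions in ticket[10:]:
--                 if number_of_symbols == 10:
--                     return f'ticket "{ticket}" - {number_of_symbols}{current_symbol} Jackpot!'
--                 return f'ticket "{ticket}" - {number_of_symbols}{current_symbol}'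
--     return f'ticket "{ticket}" - no match'
-- ===== SOURCE B (Python) =====
-- def winning_ticket_check(ticket):
--     def max_run(part, sym):
--         best = cur = 0
--         for ch in part:
--             cur = cur + 1 if ch == sym else 0
--             if cur > best:
--                 best = cur
--         return best
--     first, second = ticket[:10], ticket[10:]
--     for sym in '@#$^':
--         length = min(max_run(first, sym), max_run(second, sym), 10)
--         if length >= 6:
--             if length == 10:
--                 return f'ticket "{ticket}" - {length}{sym} Jackpot!'
--             return f'ticket "{ticket}" - {length}{sym}'
--     return f'ticket "{ticket}" - no match'
-- ===== Notes on version B (the rewrite author's own statement) =====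
-- stated objective: alternative
-- what changed: Replaces the nested probe loop (for each symbol, try substrings of length 10..6 against both halves) by a single run-length scan of each half per symbol, taking L = min(run_left, run_right, 10) and comparing L against 6/10 directly.
import Mathlib
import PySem

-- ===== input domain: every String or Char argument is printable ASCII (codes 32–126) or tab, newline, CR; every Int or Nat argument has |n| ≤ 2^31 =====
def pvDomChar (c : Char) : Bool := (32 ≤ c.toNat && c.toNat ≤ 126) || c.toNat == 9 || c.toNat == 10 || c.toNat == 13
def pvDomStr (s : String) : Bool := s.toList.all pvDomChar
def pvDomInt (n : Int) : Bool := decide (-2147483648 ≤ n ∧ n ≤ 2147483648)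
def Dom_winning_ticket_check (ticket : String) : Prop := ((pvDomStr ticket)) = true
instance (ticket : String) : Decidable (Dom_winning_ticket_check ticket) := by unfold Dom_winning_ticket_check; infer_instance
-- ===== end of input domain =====

-- B replaces A's nested substring-probe loop (k*symbol in each half, k = 10..6) by one
-- run-length scan of each half per symbol; same results, alternative algorithm (not measured faster).


-- ===== PORT A =====
-- shared f-string builder: both Pythons produce the same f'ticket "{ticket}" - …' strings
def pvFmt (ticket : String) (tail : List Char) : String :=
  String.ofList ("ticket \"".toList ++ ticket.toList ++ "\" - ".toList ++ tail)

-- inner loop 'for number_of_symbols in range(10, 5, -1)'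
def aTryLens (ticket : String) (c : Char) : List Int → Option String
  | [] => none
  | k :: ks =>
    let rep := String.ofList (List.replicate k.toNat c)
    if PySem.Str.isIn rep (PySem.Str.slice ticket none (some 10)) &&
       PySem.Str.isIn rep (PySem.Str.slice ticket (some 10) none) then
      if k = 10 then
        some (pvFmt ticket (PySem.Int.toChars k ++ [c] ++ " Jackpot!".toList))
      else
        some (pvFmt ticket (PySem.Int.toChars k ++ [c]))
    else aTryLens ticket c ks

-- outer loop 'for current_symbol in winning_symbols'
def aLoop (ticket : String) : List Char → String
  | [] => pvFmt ticket "no match".toList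
  | c :: cs =>
    match aTryLens ticket c (PySem.List.pyRange 10 5 (-1)) with
    | some s => s
    | none => aLoop ticket cs

def winning_ticket_check (ticket : String) : String :=
  aLoop ticket ['@', '#', '$', '^']

-- ===== PORT B =====
-- longest run of sym in part, one scan (Source B's max_run)
def bStep (sym : Char) (st : Nat × Nat) (ch : Char) : Nat × Nat :=
  let cur := if ch = sym then st.1 + 1 else 0
  (cur, max st.2 cur)

def bMaxRun (part : List Char) (sym : Char) : Nat :=
  (part.foldl (bStep sym) (0, 0)).2

def bTry (ticket first second : String) (sym : Char) : Option String :=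
  let length := min (min (bMaxRun first.toList sym) (bMaxRun second.toList sym)) 10
  if 6 ≤ length then
    if length = 10 then
      some (pvFmt ticket (PySem.Int.toChars (length : Int) ++ [sym] ++ " Jackpot!".toList))
    else
      some (pvFmt ticket (PySem.Int.toChars (length : Int) ++ [sym]))
  else none

def bLoop (ticket first second : String) : List Char → String
  | [] => pvFmt ticket "no match".toList
  | sym :: syms =>
    match bTry ticket first second sym with
    | some s => s
    | none => bLoop ticket first second syms

def winning_ticket_check_alt (ticket : String) : String :=
  bLoop ticket (PySem.Str.slice ticket none (some 10)) (PySem.Str.slice ticket (some 10) none)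
    "@#$^".toList

-- ===== PRECONDITION & SPEC =====
def Spec_winning_ticket_check (ticket : String) (out : String) : Prop := out = winning_ticket_check_alt ticket
instance (ticket : String) (out : String) : Decidable (Spec_winning_ticket_check ticket out) := by unfold Spec_winning_ticket_check; infer_instance

-- ===== CLAIM (what is proved, stated in full; the proofs are below) =====
def Claim_equal_winning_ticket_check : Prop := ∀ (ticket : String), Dom_winning_ticket_check ticket → Spec_winning_ticket_check ticket (winning_ticket_check ticket)

-- ===== LEMMAS AND PROOFS =====

-- length of the leading run of c in s
def pvLead (c : Char) : List Char → Nat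
  | [] => 0
  | x :: xs => if x = c then pvLead c xs + 1 else 0

-- length of the longest run of c in s
def pvMrun (c : Char) : List Char → Nat
  | [] => 0
  | x :: xs => max (pvLead c (x :: xs)) (pvMrun c xs)

theorem pvLead_le_mrun (c : Char) (s : List Char) : pvLead c s ≤ pvMrun c s := by
  cases s with
  | nil => simp [pvLead, pvMrun]
  | cons x xs => simp [pvMrun]

theorem pv_prefix_replicate_iff (c : Char) (k : Nat) (s : List Char) :
    List.replicate k c <+: s ↔ k ≤ pvLead c s := by
  induction s generalizing k with
  | nil =>
    cases k with
    | zero => simp [pvLead]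
    | succ n => simp [pvLead, List.replicate_succ]
  | cons x xs ih =>
    cases k with
    | zero => simp [pvLead]
    | succ n =>
      rw [List.replicate_succ, List.cons_prefix_cons]
      by_cases hx : x = c
      · subst hx; simp [pvLead, ih]
      · simp only [pvLead, if_neg hx]
        constructor
        · rintro ⟨rfl, -⟩; exact absurd rfl hx
        · omega

theorem pv_infix_replicate_iff (c : Char) (k : Nat) (s : List Char) :
    List.replicate k c <:+: s ↔ k ≤ pvMrun c s := by
  induction s with
  | nil =>
    cases k with
    | zero => simp [pvMrun]
    | succ n => simp [pvMrun, List.replicate_succ]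
  | cons x xs ih =>
    rw [List.infix_cons_iff, pv_prefix_replicate_iff, ih, pvMrun, le_max_iff]

theorem pv_fold_run (c : Char) (s : List Char) (cur best : Nat) (h : cur ≤ best) :
    (s.foldl (bStep c) (cur, best)).2
      = max best (max (cur + pvLead c s) (pvMrun c s)) := by
  induction s generalizing cur best with
  | nil => simp [pvLead, pvMrun]; omega
  | cons x xs ih =>
    rw [List.foldl_cons]
    by_cases hx : x = c
    · rw [show bStep c (cur, best) x = (cur + 1, max best (cur + 1)) from by simp [bStep, hx]]
      rw [ih _ _ (le_max_right _ _)]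
      simp only [pvLead, pvMrun, if_pos hx]
      omega
    · rw [show bStep c (cur, best) x = (0, max best 0) from by simp [bStep, hx]]
      have hl := pvLead_le_mrun c xs
      rw [ih _ _ (Nat.zero_le _)]
      simp only [pvLead, pvMrun, if_neg hx]
      omega

theorem pv_bMaxRun_eq (part : List Char) (c : Char) : bMaxRun part c = pvMrun c part := by
  have := pv_fold_run c part 0 0 (le_refl 0)
  have hl := pvLead_le_mrun c part
  unfold bMaxRun
  omega

theorem pv_cond (c : Char) (k : Nat) (h1 h2 : String) (hk : k ≤ 10) :
    (PySem.Str.isIn (String.ofList (List.replicate k c)) h1 &&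
       PySem.Str.isIn (String.ofList (List.replicate k c)) h2)
      = decide (k ≤ min (min (pvMrun c h1.toList) (pvMrun c h2.toList)) 10) := by
  have e1 : PySem.Str.isIn (String.ofList (List.replicate k c)) h1 = true ↔ k ≤ pvMrun c h1.toList := by
    rw [PySem.Str.isIn_iff_infix]; simp [pv_infix_replicate_iff]
  have e2 : PySem.Str.isIn (String.ofList (List.replicate k c)) h2 = true ↔ k ≤ pvMrun c h2.toList := by
    rw [PySem.Str.isIn_iff_infix]; simp [pv_infix_replicate_iff]
  by_cases h : k ≤ min (min (pvMrun c h1.toList) (pvMrun c h2.toList)) 10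
  · rw [e1.mpr (by omega), e2.mpr (by omega)]; simp; omega
  · have : ¬ (k ≤ pvMrun c h1.toList) ∨ ¬ (k ≤ pvMrun c h2.toList) := by omega
    rcases this with hna | hnb
    · rw [(Bool.not_eq_true _).mp (fun ht => hna (e1.mp ht))]; simp; omega
    · rw [(Bool.not_eq_true _).mp (fun ht => hnb (e2.mp ht))]; simp; omega

theorem pv_try_eq (ticket : String) (c : Char) :
    aTryLens ticket c (PySem.List.pyRange 10 5 (-1))
      = bTry ticket (PySem.Str.slice ticket none (some 10)) (PySem.Str.slice ticket (some 10) none) c := by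
  have hr : PySem.List.pyRange 10 5 (-1) = [10, 9, 8, 7, 6] := by decide
  rw [hr]
  set h1 := PySem.Str.slice ticket none (some 10) with hh1
  set h2 := PySem.Str.slice ticket (some 10) none with hh2
  unfold bTry
  simp only [pv_bMaxRun_eq]
  set L := min (min (pvMrun c h1.toList) (pvMrun c h2.toList)) 10 with hL
  have hL10 : L ≤ 10 := by omega
  simp only [aTryLens]
  rw [show ((10 : Int).toNat) = 10 from rfl, show ((9 : Int).toNat) = 9 from rfl,
      show ((8 : Int).toNat) = 8 from rfl, show ((7 : Int).toNat) = 7 from rfl,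
      show ((6 : Int).toNat) = 6 from rfl]
  rw [pv_cond c 10 h1 h2 (by omega), pv_cond c 9 h1 h2 (by omega), pv_cond c 8 h1 h2 (by omega),
      pv_cond c 7 h1 h2 (by omega), pv_cond c 6 h1 h2 (by omega)]
  rw [← hL]
  clear_value L
  interval_cases L <;> simp

theorem pv_loop_eq (ticket : String) (syms : List Char) :
    aLoop ticket syms
      = bLoop ticket (PySem.Str.slice ticket none (some 10)) (PySem.Str.slice ticket (some 10) none) syms := by
  induction syms with
  | nil => rfl
  | cons c cs ih => rw [aLoop, bLoop, pv_try_eq, ih]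

-- ===== VERDICT (by name: the statement is the Claim_ definition above) =====
theorem winning_ticket_check_spec : Claim_equal_winning_ticket_check := by
  intro ticket _
  unfold Spec_winning_ticket_check winning_ticket_check winning_ticket_check_alt
  exact pv_loop_eq ticket _
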